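-- pv_equiv track=rewrite | github.com/yunwei37/agentcgroup | scripts/analyze_bottleneck_attribution.py | classify_phase
-- ===== SOURCE A (Python) =====
-- def classify_phase(tool: str, command: str) -> str:
--     t = (tool or "").lower()
--     c = (command or "").lower()
--     if t in {"read", "glob", "grep", "ls"}:
--         return "discovery"
--     if t in {"edit", "write", "multiedit"}:
--         return "editing"
--     if t == "bash":
--         if any(k in c for k in ["pytest", "unittest", "tox ", "nose", "python -m pytest"]):
--             return "testing"
--         if any(k in c for k in ["pip install", "pip3 install", "npm install", "yarn install", "poetry install", "apt-get", "conda install", "uv pip"]):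
--             return "build_install"
--         if "git " in c:
--             if any(k in c for k in ["git checkout", "git reset", "git stash", "git revert", "git clean"]):
--                 return "vcs_revert"
--             return "discovery"
--         if any(k in c for k in ["find ", "ls ", "grep ", "sed -n", "cat ", "head ", "tail "]):
--             return "discovery"
--         if any(k in c for k in ["python -c", "python ", "node ", "uvicorn", "gunicorn", "flask run"]):
--             return "runtime_probe"
--     return "other"
-- ===== SOURCE B (Python) =====
-- _DISCOVERY_TOOLS = ("read", "glob", "grep", "ls")
-- _EDITING_TOOLS = ("edit", "write", "multiedit")
-- # Ordered rule table: first rule whose any keyword occurs in the command wins.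
-- # vcs keywords all contain "git ", so placing them before the bare "git " rule
-- # preserves A's nested-git behaviour.
-- _BASH_RULES = [
--     (["pytest", "unittest", "tox ", "nose", "python -m pytest"], "testing"),
--     (["pip install", "pip3 install", "npm install", "yarn install",
--       "poetry install", "apt-get", "conda install", "uv pip"], "build_install"),
--     (["git checkout", "git reset", "git stash", "git revert", "git clean"], "vcs_revert"),
--     (["git "], "discovery"),
--     (["find ", "ls ", "grep ", "sed -n", "cat ", "head ", "tail "], "discovery"),
--     (["python -c", "python ", "node ", "uvicorn", "gunicorn", "flask run"], "runtime_probe"),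
-- ]
--
-- def classify_phase(tool: str, command: str) -> str:
--     t = (tool or "").lower()
--     if t in _DISCOVERY_TOOLS:
--         return "discovery"
--     if t in _EDITING_TOOLS:
--         return "editing"
--     if t != "bash":
--         return "other"
--     c = (command or "").lower()
--     for keywords, phase in _BASH_RULES:
--         if any(k in c for k in keywords):
--             return phase
--     return "other"
-- ===== Notes on version B (the rewrite author's own statement) =====
-- stated objective: simpler
-- what changed: Replaces the hard-coded if/elif cascade for bash commands by a data-driven ordered rule table (keyword-list, phase) scanned by one generic loop; the nested git branch is flattened into two consecutive rules (vcs keywords, then bare 'git '), which is equivalent because every vcs keyword contains 'git '.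
import Mathlib
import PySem

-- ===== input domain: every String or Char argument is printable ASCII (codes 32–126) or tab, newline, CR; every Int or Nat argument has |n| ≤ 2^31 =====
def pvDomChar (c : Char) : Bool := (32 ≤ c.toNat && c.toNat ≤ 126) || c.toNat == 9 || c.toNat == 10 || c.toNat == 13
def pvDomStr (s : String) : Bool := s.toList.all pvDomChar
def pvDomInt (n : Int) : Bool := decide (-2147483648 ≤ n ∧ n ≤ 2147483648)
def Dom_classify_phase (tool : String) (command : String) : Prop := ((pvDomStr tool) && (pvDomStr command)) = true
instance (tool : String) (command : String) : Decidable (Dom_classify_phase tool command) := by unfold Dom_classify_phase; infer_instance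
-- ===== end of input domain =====

-- B replaces A's hard-coded if/elif cascade for bash commands by a data-driven
-- ordered rule table scanned by one generic loop (objective: simpler).

-- ===== PORT A =====
def classify_phase (tool : String) (command : String) : String :=
  let t := PySem.Str.lower (if tool == "" then "" else tool)
  let c := PySem.Str.lower (if command == "" then "" else command)
  if ["read", "glob", "grep", "ls"].contains t then "discovery"
  else if ["edit", "write", "multiedit"].contains t then "editing"
  else if t == "bash" then
    if ["pytest", "unittest", "tox ", "nose", "python -m pytest"].any
        (fun k => PySem.Str.isIn k c) then "testing"
    else if ["pip install", "pip3 install", "npm install", "yarn install",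
             "poetry install", "apt-get", "conda install", "uv pip"].any
        (fun k => PySem.Str.isIn k c) then "build_install"
    else if PySem.Str.isIn "git " c then
      if ["git checkout", "git reset", "git stash", "git revert", "git clean"].any
          (fun k => PySem.Str.isIn k c) then "vcs_revert"
      else "discovery"
    else if ["find ", "ls ", "grep ", "sed -n", "cat ", "head ", "tail "].any
        (fun k => PySem.Str.isIn k c) then "discovery"
    else if ["python -c", "python ", "node ", "uvicorn", "gunicorn", "flask run"].any
        (fun k => PySem.Str.isIn k c) then "runtime_probe"
    else "other"
  else "other"

-- ===== PORT B =====
def pvBashRules : List (List String × String) :=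
  [(["pytest", "unittest", "tox ", "nose", "python -m pytest"], "testing"),
   (["pip install", "pip3 install", "npm install", "yarn install",
     "poetry install", "apt-get", "conda install", "uv pip"], "build_install"),
   (["git checkout", "git reset", "git stash", "git revert", "git clean"], "vcs_revert"),
   (["git "], "discovery"),
   (["find ", "ls ", "grep ", "sed -n", "cat ", "head ", "tail "], "discovery"),
   (["python -c", "python ", "node ", "uvicorn", "gunicorn", "flask run"], "runtime_probe")]

def pvFirstRule (c : String) : List (List String × String) → String
  | [] => "other"
  | (kws, phase) :: rest =>
      if kws.any (fun k => PySem.Str.isIn k c) then phase else pvFirstRule c rest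

def classify_phase_alt (tool : String) (command : String) : String :=
  let t := PySem.Str.lower (if tool == "" then "" else tool)
  if ["read", "glob", "grep", "ls"].contains t then "discovery"
  else if ["edit", "write", "multiedit"].contains t then "editing"
  else if t != "bash" then "other"
  else
    let c := PySem.Str.lower (if command == "" then "" else command)
    pvFirstRule c pvBashRules

-- ===== PRECONDITION & SPEC =====
def Spec_classify_phase (tool : String) (command : String) (out : String) : Prop := out = classify_phase_alt tool command
instance (tool : String) (command : String) (out : String) : Decidable (Spec_classify_phase tool command out) := by unfold Spec_classify_phase; infer_instance

-- ===== CLAIM (what is proved, stated in full; the proofs are below) =====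
def Claim_equal_classify_phase : Prop := ∀ (tool : String) (command : String), Dom_classify_phase tool command → Spec_classify_phase tool command (classify_phase tool command)

-- ===== LEMMAS AND PROOFS =====

-- substring containment is transitive through a fixed infix keyword:
-- if "git " does not occur in c, no keyword containing "git " occurs in c
theorem pvNotIn_of_notIn (a b : List Char) (c : String) (hab : a <:+: b)
    (h : ¬ PySem.Chars.isIn a c.toList = true) : PySem.Chars.isIn b c.toList = false := by
  rw [Bool.eq_false_iff]
  intro hb
  exact h ((PySem.Chars.isIn_iff_infix a c.toList).2
    (hab.trans ((PySem.Chars.isIn_iff_infix b c.toList).1 hb)))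

-- ===== VERDICT (by name: the statement is the Claim_ definition above) =====
theorem classify_phase_spec : Claim_equal_classify_phase := by
  intro tool command _
  unfold Spec_classify_phase classify_phase classify_phase_alt
  simp only [pvBashRules, pvFirstRule]
  set c := PySem.Str.lower (if command == "" then "" else command) with hc
  by_cases hg : PySem.Chars.isIn ['g', 'i', 't', ' '] c.toList = true
  · simp [hg]
  · have h1 : PySem.Chars.isIn ['g','i','t',' ','c','h','e','c','k','o','u','t'] c.toList = false :=
      pvNotIn_of_notIn _ _ c (by decide) hg
    have h2 : PySem.Chars.isIn ['g','i','t',' ','r','e','s','e','t'] c.toList = false :=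
      pvNotIn_of_notIn _ _ c (by decide) hg
    have h3 : PySem.Chars.isIn ['g','i','t',' ','s','t','a','s','h'] c.toList = false :=
      pvNotIn_of_notIn _ _ c (by decide) hg
    have h4 : PySem.Chars.isIn ['g','i','t',' ','r','e','v','e','r','t'] c.toList = false :=
      pvNotIn_of_notIn _ _ c (by decide) hg
    have h5 : PySem.Chars.isIn ['g','i','t',' ','c','l','e','a','n'] c.toList = false :=
      pvNotIn_of_notIn _ _ c (by decide) hg
    simp [hg, h1, h2, h3, h4, h5]
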